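-- pv_equiv track=rewrite | github.com/EHone5561/codetree-TILs | 240312/함수를 이용한 온전수 판별/determining-the-whole-number-using-a-function.py | search
-- ===== SOURCE A (Python) =====
-- def search(x, y):
--     cnt = 0
--     for i in range(x, y + 1):
--         if i % 2 == 0:
--             pass
--         elif int(list(str(i))[-1]) == 5:
--             pass
--         elif (i % 3 == 0) and (i % 9 != 0):
--             pass
--         else:
--             cnt += 1
--     return cnt
-- ===== SOURCE B (Python) =====
-- # Closed-form O(1) re-implementation: the pass/fail pattern of A's three
-- # filters is periodic with period 90 (lcm of 2, 10, 9), so count full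
-- # periods arithmetically plus a precomputed prefix table.
--
-- _GOOD = [r % 2 == 1 and r % 10 != 5 and not (r % 3 == 0 and r % 9 != 0)
--          for r in range(90)]
-- _PREF = [0]
-- for g in _GOOD:
--     _PREF.append(_PREF[-1] + g)
-- _PER = _PREF[90]
--
--
-- def _below(n):
--     # number of passing integers in [90*floor(n/90) .. n) plus _PER per full period
--     q, r = divmod(n, 90)
--     return q * _PER + _PREF[r]
--
--
-- def search(x, y):
--     if y < x:
--         return 0
--     return _below(y + 1) - _below(x)
-- ===== Notes on version B (the rewrite author's own statement) =====
-- stated objective: faster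
-- what changed: Replaces the per-integer scan of [x,y] with a closed form: the three filters are periodic with period 90, so B counts full periods arithmetically and adds a precomputed 90-entry prefix table.
import Mathlib
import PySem

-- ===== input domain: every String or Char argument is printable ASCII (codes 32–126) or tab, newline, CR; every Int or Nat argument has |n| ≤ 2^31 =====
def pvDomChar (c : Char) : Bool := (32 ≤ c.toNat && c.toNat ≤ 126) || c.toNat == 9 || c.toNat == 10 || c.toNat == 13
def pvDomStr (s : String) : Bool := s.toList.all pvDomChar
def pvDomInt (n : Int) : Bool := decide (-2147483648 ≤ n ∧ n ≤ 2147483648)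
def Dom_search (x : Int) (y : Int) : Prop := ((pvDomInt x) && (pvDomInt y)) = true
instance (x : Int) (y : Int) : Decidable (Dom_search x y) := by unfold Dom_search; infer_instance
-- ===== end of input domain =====

-- B replaces A's per-integer scan of [x, y] with a period-90 closed form
-- (full periods counted arithmetically + a 90-entry prefix table); faster.


-- ===== PORT A =====
-- int(list(str(i))[-1]) == 5 ; str(i) is never empty so the [-1] index
-- cannot raise: pyGetD's default "" is unreachable.
def pvLastDigitIs5 (i : Int) : Bool :=
  PySem.Int.ofStr?
      (PySem.List.pyGetD ((PySem.Int.toChars i).map (fun c => String.ofList [c])) (-1) "")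
    == some 5

def search (x : Int) (y : Int) : Int :=
  (PySem.List.pyRange x (y + 1) 1).foldl
    (fun cnt i =>
      if PySem.Int.mod i 2 == 0 then cnt
      else if pvLastDigitIs5 i then cnt
      else if PySem.Int.mod i 3 == 0 && !(PySem.Int.mod i 9 == 0) then cnt
      else cnt + 1) 0

-- ===== PORT B =====
-- _GOOD[r] for r in range(90)
def pvGoodRes (r : Int) : Bool :=
  PySem.Int.mod r 2 == 1 && !(PySem.Int.mod r 10 == 5)
    && !(PySem.Int.mod r 3 == 0 && !(PySem.Int.mod r 9 == 0))

-- _PREF[r] = running count of True entries of _GOOD before index r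
def pvPref (r : Nat) : Int :=
  ((List.range r).countP (fun k => pvGoodRes (Int.ofNat k)) : Int)

-- _below(n); _PER = _PREF[90]
def pvBelow (n : Int) : Int :=
  PySem.Int.floordiv n 90 * pvPref 90 + pvPref (PySem.Int.mod n 90).toNat

def search_alt (x : Int) (y : Int) : Int :=
  if y < x then 0 else pvBelow (y + 1) - pvBelow x

-- ===== PRECONDITION & SPEC =====
def Spec_search (x : Int) (y : Int) (out : Int) : Prop := out = search_alt x y
instance (x : Int) (y : Int) (out : Int) : Decidable (Spec_search x y out) := by unfold Spec_search; infer_instance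

-- ===== CLAIM (what is proved, stated in full; the proofs are below) =====
def Claim_equal_search : Prop := ∀ (x : Int) (y : Int), Dom_search x y → Spec_search x y (search x y)

-- ===== LEMMAS AND PROOFS =====

lemma pv_toDigitsCore_step (b f n : Nat) (ds : List Char) : Nat.toDigitsCore b (f+1) n ds =
    if n / b = 0 then (n % b).digitChar :: ds else Nat.toDigitsCore b f (n / b) ((n % b).digitChar :: ds) := by
  conv_lhs => rw [Nat.toDigitsCore]

-- Nat.toDigitsCore prepends digits in front of the accumulator.
lemma pv_toDigitsCore_append (fuel : Nat) :
    ∀ (n : Nat) (ds : List Char),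
      Nat.toDigitsCore 10 fuel n ds = Nat.toDigitsCore 10 fuel n [] ++ ds := by
  induction fuel with
  | zero => intro n ds; rfl
  | succ f ih =>
      intro n ds
      rw [pv_toDigitsCore_step, pv_toDigitsCore_step]
      by_cases h : n / 10 = 0
      · simp [h]
      · simp only [h, if_false]
        rw [ih (n / 10) ((n % 10).digitChar :: ds), ih (n / 10) [(n % 10).digitChar]]
        simp

-- str(n) ends with the digit character of n % 10.
lemma pv_toDigits_last (n : Nat) :
    ∃ pre, Nat.toDigits 10 n = pre ++ [(n % 10).digitChar] := by
  rw [Nat.toDigits, pv_toDigitsCore_step]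
  by_cases h : n / 10 = 0
  · exact ⟨[], by simp [h]⟩
  · refine ⟨Nat.toDigitsCore 10 n (n / 10) [], ?_⟩
    rw [if_neg h, pv_toDigitsCore_append n (n / 10) [(n % 10).digitChar]]

lemma pv_toChars_last (i : Int) :
    ∃ pre, PySem.Int.toChars i = pre ++ [(i.natAbs % 10).digitChar] := by
  unfold PySem.Int.toChars
  by_cases h : i < 0
  · obtain ⟨pre, hp⟩ := pv_toDigits_last i.natAbs
    exact ⟨'-' :: pre, by simp [h, hp]⟩
  · obtain ⟨pre, hp⟩ := pv_toDigits_last i.toNat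
    have ht : i.toNat = i.natAbs := by omega
    rw [ht] at hp
    refine ⟨pre, ?_⟩
    simp only [h, if_false]
    rw [ht]
    exact hp

lemma pv_ofStr_digitChar (d : Nat) (hd : d < 10) :
    (PySem.Int.ofStr? (String.ofList [d.digitChar]) == some 5) = (d == 5) := by
  interval_cases d <;> decide

-- A's string test is "i % 10 == 5" (Python %, divisor 10 > 0).
lemma pv_lastDigit_eq (i : Int) : pvLastDigitIs5 i = (i % 10 == 5) := by
  obtain ⟨pre, hp⟩ := pv_toChars_last i
  unfold pvLastDigitIs5
  rw [hp, List.map_append, List.map_singleton,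
      PySem.List.pyGetD_neg_one_append_singleton,
      pv_ofStr_digitChar _ (Nat.mod_lt _ (by omega))]
  by_cases h : i.natAbs % 10 = 5
  · simp [h, show i % 10 = 5 from by omega]
  · simp [h, show ¬ i % 10 = 5 from by omega]

-- A's loop body counts exactly the residues B tabulates.
lemma pv_body_eq (cnt i : Int) :
    (if PySem.Int.mod i 2 == 0 then cnt
     else if pvLastDigitIs5 i then cnt
     else if PySem.Int.mod i 3 == 0 && !(PySem.Int.mod i 9 == 0) then cnt
     else cnt + 1)
    = if pvGoodRes (PySem.Int.mod i 90) then cnt + 1 else cnt := by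
  have e90 : PySem.Int.mod i 90 = i % 90 := PySem.Int.mod_eq_emod_of_pos (by omega)
  have e2 : PySem.Int.mod i 2 = i % 2 := PySem.Int.mod_eq_emod_of_pos (by omega)
  have e3 : PySem.Int.mod i 3 = i % 3 := PySem.Int.mod_eq_emod_of_pos (by omega)
  have e9 : PySem.Int.mod i 9 = i % 9 := PySem.Int.mod_eq_emod_of_pos (by omega)
  have g2 : PySem.Int.mod (i % 90) 2 = i % 2 := by
    rw [PySem.Int.mod_eq_emod_of_pos (by omega)]
    exact Int.emod_emod_of_dvd i (by norm_num)
  have g10 : PySem.Int.mod (i % 90) 10 = i % 10 := by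
    rw [PySem.Int.mod_eq_emod_of_pos (by omega)]
    exact Int.emod_emod_of_dvd i (by norm_num)
  have g3 : PySem.Int.mod (i % 90) 3 = i % 3 := by
    rw [PySem.Int.mod_eq_emod_of_pos (by omega)]
    exact Int.emod_emod_of_dvd i (by norm_num)
  have g9 : PySem.Int.mod (i % 90) 9 = i % 9 := by
    rw [PySem.Int.mod_eq_emod_of_pos (by omega)]
    exact Int.emod_emod_of_dvd i (by norm_num)
  unfold pvGoodRes
  rw [e90, e2, e3, e9, g2, g10, g3, g9, pv_lastDigit_eq]
  by_cases a2 : i % 2 = 0 <;>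
    by_cases a10 : i % 10 = 5 <;>
      by_cases a3 : i % 3 = 0 <;>
        by_cases a9 : i % 9 = 0 <;>
          simp [a2, a10, a3, a9]

lemma pv_pref_succ (r : Nat) :
    pvPref (r + 1) = pvPref r + (if pvGoodRes (Int.ofNat r) then 1 else 0) := by
  unfold pvPref
  rw [List.range_succ, List.countP_append]
  simp only [Int.ofNat_eq_natCast]
  split_ifs with h <;> simp [h]

lemma pv_below_succ (n : Int) :
    pvBelow (n + 1) = pvBelow n + (if pvGoodRes (PySem.Int.mod n 90) then 1 else 0) := by
  have em : PySem.Int.mod n 90 = n % 90 := PySem.Int.mod_eq_emod_of_pos (by omega)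
  have em' : PySem.Int.mod (n + 1) 90 = (n + 1) % 90 := PySem.Int.mod_eq_emod_of_pos (by omega)
  have ed : PySem.Int.floordiv n 90 = n / 90 := PySem.Int.floordiv_eq_ediv_of_pos (by omega)
  have ed' : PySem.Int.floordiv (n + 1) 90 = (n + 1) / 90 := PySem.Int.floordiv_eq_ediv_of_pos (by omega)
  unfold pvBelow
  rw [em, em', ed, ed']
  by_cases h89 : n % 90 = 89
  · have h1 : (n + 1) % 90 = 0 := by omega
    have h2 : (n + 1) / 90 = n / 90 + 1 := by omega
    have h3 : (n % 90).toNat = 89 := by omega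
    have hP90 : pvPref 90 = 28 := by decide
    have hP89 : pvPref 89 = 27 := by decide
    have hP0 : pvPref 0 = 0 := rfl
    have hg : pvGoodRes (n % 90) = true := by rw [h89]; decide
    rw [h1, h2, h3, hg]
    simp only [Int.toNat_zero, hP90, hP89, hP0, if_true]
    ring
  · have hlt : n % 90 < 90 := Int.emod_lt_of_pos n (by omega)
    have hge : (0:Int) ≤ n % 90 := Int.emod_nonneg n (by omega)
    have h1 : (n + 1) % 90 = n % 90 + 1 := by omega
    have h2 : (n + 1) / 90 = n / 90 := by omega
    have h3 : ((n + 1) % 90).toNat = (n % 90).toNat + 1 := by omega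
    rw [h3, h2, pv_pref_succ ((n % 90).toNat)]
    have hc : Int.ofNat (n % 90).toNat = n % 90 := by
      simpa using Int.toNat_of_nonneg hge
    rw [hc]
    by_cases hb : pvGoodRes (n % 90)
    · simp [hb]
      ring
    · simp [hb]

-- A's loop over range(a, a+k) counts B's closed form.
lemma pv_count_eq (a : Int) (k : Nat) :
    ((PySem.List.pyRange a (a + k) 1).foldl
      (fun cnt i => if pvGoodRes (PySem.Int.mod i 90) then cnt + 1 else cnt) 0)
    = pvBelow (a + k) - pvBelow a := by
  induction k with
  | zero => simp [PySem.List.pyRange_one_eq_nil (le_refl a)]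
  | succ m ih =>
      have hsplit : PySem.List.pyRange a (a + (m + 1 : Nat)) 1
          = PySem.List.pyRange a (a + m) 1 ++ [a + m] := by
        have : (a + ((m : Int) + 1)) = (a + m) + 1 := by ring
        push_cast
        rw [this]
        exact PySem.List.pyRange_one_succ_right (by omega)
      rw [hsplit, List.foldl_append, ih]
      simp only [List.foldl_cons, List.foldl_nil]
      have hc : (a + ((m:Nat) + 1 : Nat) : Int) = (a + m) + 1 := by push_cast; ring
      rw [hc, pv_below_succ (a + m)]
      split_ifs <;> ring

-- ===== VERDICT (by name: the statement is the Claim_ definition above) =====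
theorem search_spec : Claim_equal_search := by
  intro x y _
  show search x y = search_alt x y
  unfold search search_alt
  by_cases hlt : y < x
  · rw [PySem.List.pyRange_one_eq_nil (by omega)]
    simp [hlt]
  · have hb : (fun (cnt i : Int) =>
        if PySem.Int.mod i 2 == 0 then cnt
        else if pvLastDigitIs5 i then cnt
        else if PySem.Int.mod i 3 == 0 && !(PySem.Int.mod i 9 == 0) then cnt
        else cnt + 1)
      = (fun cnt i => if pvGoodRes (PySem.Int.mod i 90) then cnt + 1 else cnt) := by
      funext cnt i; exact pv_body_eq cnt i
    rw [hb]
    have hk : y + 1 = x + ((y + 1 - x).toNat : Int) := by omega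
    rw [hk, pv_count_eq x (y + 1 - x).toNat, ← hk]
    simp [hlt]
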